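-- pv_equiv track=rewrite | github.com/pmok3/wordle | GAC_solver.py | interlink
-- ===== SOURCE A (Python) =====
-- def share(a, b):
--     #Returns true if two words share one or more letters
--     a_set = set(a)
--     for i in range(len(b)):
--         if b[i] in a_set:
--             return True
--
--     return False
--
-- def interlink(words):
--     #Find the most interlinked word
--     rank_dict = {}
--
--     for i in range(len(words)):
--         rank = 0
--
--         for j in range(len(words)):
--             if i != j:
--                 if share(words[i], words[j]) == True:
--                     rank += 1
--             rank_dict[words[i]] = rank
--
--     #Take max
--     max_val = -1
--     max_word = ""
--
--     for k in rank_dict.keys():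
--         rank = rank_dict[k]
--         if rank > max_val:
--             max_val = rank
--             max_word = k
--
--     return max_word
-- ===== SOURCE B (Python) =====
-- def interlink(words):
--     # Bitmask re-implementation: one pass builds a char-bitmask per distinct word and a
--     # counter of masks; rank(w) = n - (#words with disjoint mask) - (1 if w nonempty).
--     n = len(words)
--     word_mask = {}
--     mask_count = {}
--     for w in words:
--         m = 0
--         for c in w:
--             m |= 1 << ord(c)
--         word_mask[w] = m
--         mask_count[m] = mask_count.get(m, 0) + 1
--     best_val = -1
--     best_word = ""
--     for w, m in word_mask.items():
--         disjoint = sum(cnt for mm, cnt in mask_count.items() if mm & m == 0)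
--         rank = n - disjoint - (1 if m != 0 else 0)
--         if rank > best_val:
--             best_val = rank
--             best_word = w
--     return best_word
-- ===== Notes on version B (the rewrite author's own statement) =====
-- stated objective: faster
-- what changed: Replaces the all-pairs share() letter-scan with per-word character bitmasks and a mask counter built in one pass; each distinct word's rank is n minus the number of disjoint-mask words (one O(1) bit-AND per distinct mask) minus a self term.
import Mathlib
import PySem

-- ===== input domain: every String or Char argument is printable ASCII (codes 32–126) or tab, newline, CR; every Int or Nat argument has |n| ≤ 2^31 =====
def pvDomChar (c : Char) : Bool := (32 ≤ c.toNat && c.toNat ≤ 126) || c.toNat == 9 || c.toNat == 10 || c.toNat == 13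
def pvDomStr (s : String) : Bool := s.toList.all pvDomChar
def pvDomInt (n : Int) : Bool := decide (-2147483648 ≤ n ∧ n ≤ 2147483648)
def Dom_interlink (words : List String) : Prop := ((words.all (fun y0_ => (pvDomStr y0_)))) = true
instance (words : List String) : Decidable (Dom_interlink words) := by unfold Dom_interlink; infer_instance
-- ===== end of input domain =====

-- B replaces A's all-pairs share() letter-scan with per-word character bitmasks and a
-- mask counter, counting disjoint-mask words once per distinct word (objective: faster).

-- ===== PORT A =====
def share (a b : String) : Bool :=
  let aSet := PySem.Set.ofList a.toList
  b.toList.any (fun c => PySem.Set.contains aSet c)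

def interlink (words : List String) : String :=
  let n := words.length
  let rankDict := (List.range n).foldl
    (fun (d : PySem.Dict String Int) i =>
      let wi := words.getD i ""
      ((List.range n).foldl
        (fun (s : Int × PySem.Dict String Int) j =>
          let rank := if !(i == j) && share wi (words.getD j "") then s.1 + 1 else s.1
          (rank, s.2.insert wi rank))
        ((0 : Int), d)).2)
    PySem.Dict.empty
  (rankDict.items.foldl
    (fun (s : Int × String) kv => if kv.2 > s.1 then (kv.2, kv.1) else s)
    ((-1 : Int), "")).2

-- ===== PORT B =====
def charMask (w : String) : Nat :=
  w.toList.foldl (fun m c => m ||| ((1 : Nat) <<< c.toNat)) 0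

def interlink_alt (words : List String) : String :=
  let n := words.length
  let wmmc := words.foldl
    (fun (s : PySem.Dict String Nat × PySem.Dict Nat Int) w =>
      let m := charMask w
      (s.1.insert w m, s.2.insert m (s.2.getD m 0 + 1)))
    (PySem.Dict.empty, PySem.Dict.empty)
  (wmmc.1.items.foldl
    (fun (s : Int × String) p =>
      let disjoint := ((wmmc.2.items.filter (fun q => q.1 &&& p.2 == 0)).map (fun q => q.2)).sum
      let rank := (n : Int) - disjoint - (if p.2 ≠ 0 then 1 else 0)
      if rank > s.1 then (rank, p.1) else s)
    ((-1 : Int), "")).2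

-- ===== PRECONDITION & SPEC =====
def Spec_interlink (words : List String) (out : String) : Prop := out = interlink_alt words
instance (words : List String) (out : String) : Decidable (Spec_interlink words out) := by unfold Spec_interlink; infer_instance

-- ===== CLAIM (what is proved, stated in full; the proofs are below) =====
def Claim_equal_interlink : Prop := ∀ (words : List String), Dom_interlink words → Spec_interlink words (interlink words)

-- ===== LEMMAS AND PROOFS =====

-- rank of word w in word list `words`, the common value both programs compute
def rankOf (words : List String) (w : String) : Int :=
  (words.length : Int)
    - ((words.map charMask).countP (fun mm => mm &&& charMask w == 0) : Int)
    - (if charMask w ≠ 0 then 1 else 0)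

-- the common canonical form of both programs: first max of rankOf over the distinct words
def bestOf (words : List String) : String :=
  ((PySem.Set.ofList words).foldl
    (fun (s : Int × String) w => if rankOf words w > s.1 then (rankOf words w, w) else s)
    ((-1 : Int), "")).2

lemma testBit_charMask_aux (cs : List Char) (m0 k : Nat) :
    (cs.foldl (fun m c => m ||| ((1 : Nat) <<< c.toNat)) m0).testBit k
      = (m0.testBit k || cs.any (fun c => c.toNat == k)) := by
  induction cs generalizing m0 with
  | nil => simp
  | cons c cs ih =>
      simp only [List.foldl_cons, ih, List.any_cons]
      rw [Nat.testBit_or, Nat.shiftLeft_eq, one_mul, Nat.testBit_two_pow]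
      cases hm : m0.testBit k <;> cases hc : decide (c.toNat = k) <;> simp_all

lemma testBit_charMask (w : String) (k : Nat) :
    (charMask w).testBit k = w.toList.any (fun c => c.toNat == k) := by
  simpa using testBit_charMask_aux w.toList 0 k

lemma share_eq (a b : String) : share a b = !(charMask a &&& charMask b == 0) := by
  rw [Bool.eq_iff_iff]
  simp only [share, List.any_eq_true, Bool.not_eq_eq_eq_not, Bool.not_true, beq_eq_false_iff_ne,
    ne_eq]
  constructor
  · rintro ⟨c, hc, hmem⟩ hzero
    have hmem' : c ∈ a.toList := by
      rw [PySem.Set.contains] at hmem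
      exact (PySem.Set.mem_ofList _ _).mp (List.contains_iff_mem.mp hmem)
    have ha : (charMask a).testBit c.toNat = true := by
      rw [testBit_charMask]; exact List.any_eq_true.mpr ⟨c, hmem', by simp⟩
    have hb : (charMask b).testBit c.toNat = true := by
      rw [testBit_charMask]; exact List.any_eq_true.mpr ⟨c, hc, by simp⟩
    have hboth : (charMask a &&& charMask b).testBit c.toNat = true := by
      rw [Nat.testBit_and, ha, hb]; rfl
    rw [hzero] at hboth; simp at hboth
  · intro hne
    obtain ⟨i, hi⟩ := Nat.exists_testBit_of_ne_zero hne
    rw [Nat.testBit_and, Bool.and_eq_true] at hi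
    obtain ⟨ha, hb⟩ := hi
    rw [testBit_charMask, List.any_eq_true] at ha hb
    obtain ⟨ca, hca, hka⟩ := ha
    obtain ⟨cb, hcb, hkb⟩ := hb
    have h1 : ca.toNat = i := by simpa using hka
    have h2 : cb.toNat = i := by simpa using hkb
    have : ca = cb := Char.ext (UInt32.toNat_inj.mp (h1.trans h2.symm))
    refine ⟨cb, hcb, ?_⟩
    rw [PySem.Set.contains]
    exact List.contains_iff_mem.mpr ((PySem.Set.mem_ofList _ _).mpr (this ▸ hca))

lemma share_self (w : String) : share w w = !(charMask w == 0) := by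
  rw [share_eq, Nat.and_self]

-- A's inner j-loop: running rank with a repeated same-key insert collapses
lemma foldl_pair_insert {α : Type} (l : List α) (hl : l ≠ []) (step : Int → α → Int)
    (key : String) (r0 : Int) (d0 : PySem.Dict String Int) :
    l.foldl (fun (s : Int × PySem.Dict String Int) j =>
        (step s.1 j, s.2.insert key (step s.1 j))) (r0, d0)
      = (l.foldl step r0, d0.insert key (l.foldl step r0)) := by
  induction l generalizing r0 d0 with
  | nil => exact absurd rfl hl
  | cons x xs ih =>
      simp only [List.foldl_cons]
      cases xs with
      | nil => simp
      | cons y ys =>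
          rw [ih (by simp)]
          rw [PySem.Dict.insert_insert_self]

-- splitting a countP by an auxiliary test
lemma countP_split {α : Type} (l : List α) (p q : α → Bool) :
    l.countP p = l.countP (fun x => q x && p x) + l.countP (fun x => !q x && p x) := by
  induction l with
  | nil => simp
  | cons x xs ih =>
      by_cases hq : q x = true <;> by_cases hp : p x = true <;>
        simp [hq, hp, ih] <;> omega

lemma countP_range_ne (n i : Nat) (hi : i < n) (P : Nat → Bool) :
    (((List.range n).countP (fun j => !(j == i) && P j) : Nat) : Int)
      = ((List.range n).countP P : Int) - (if P i then 1 else 0) := by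
  have hsplit := countP_split (List.range n) P (fun j => j == i)
  have hcnt : (List.range n).countP (fun j => (j == i) && P j)
      = if P i then 1 else 0 := by
    have heq : (List.range n).countP (fun j => (j == i) && P j)
        = ((List.range n).filter P).count i := by
      rw [List.count, List.countP_filter]
    rw [heq]
    by_cases hP : P i = true
    · rw [List.count_filter (by simpa using hP), if_pos hP]
      exact List.count_eq_one_of_mem List.nodup_range (List.mem_range.mpr hi)
    · simp [List.count_eq_zero, List.mem_filter, hP]
  by_cases hP : P i = true
  · rw [if_pos hP] at hcnt
    rw [if_pos hP]
    omega
  · rw [if_neg hP] at hcnt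
    rw [if_neg hP]
    omega

-- building a dict whose inserted value is a function of the key
lemma items_foldl_insert_fun {ν : Type} (f : String → ν) (l : List String) :
    ∀ (s : List String), s.Nodup →
    (l.foldl (fun (d : PySem.Dict String ν) w => d.insert w (f w))
        (PySem.Dict.mk (s.map (fun w => (w, f w))))).items
      = (PySem.Set.update s l).map (fun w => (w, f w)) := by
  induction l with
  | nil => intro s _; simp [PySem.Set.update]
  | cons w ws ih =>
      intro s hs
      simp only [List.foldl_cons]
      by_cases hmem : w ∈ s
      · have hins : (PySem.Dict.mk (s.map (fun u => (u, f u)))).insert w (f w)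
            = PySem.Dict.mk (s.map (fun u => (u, f u))) := by
          apply PySem.Dict.ext
          rw [PySem.Dict.items_insert_of_contains]
          · show (s.map (fun u => (u, f u))).map _ = _
            rw [List.map_map]
            apply List.map_congr_left
            intro u _
            by_cases hu : u = w <;> simp [hu]
          · rw [PySem.Dict.contains_eq_decide_mem_keys]
            simp [PySem.Dict.keys, List.map_map]
            exact hmem
        rw [hins, ih s hs]
        have hadd : PySem.Set.add s w = s := by simp [PySem.Set.add, PySem.Set.contains, hmem]
        simp [PySem.Set.update, hadd]
      · have hins : (PySem.Dict.mk (s.map (fun u => (u, f u)))).insert w (f w)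
            = PySem.Dict.mk ((s ++ [w]).map (fun u => (u, f u))) := by
          apply PySem.Dict.ext
          rw [PySem.Dict.items_insert_of_not_contains]
          · simp
          · rw [PySem.Dict.contains_eq_decide_mem_keys]
            simp [PySem.Dict.keys, List.map_map]
            exact hmem
        rw [hins, ih (s ++ [w]) (by
          simp [List.nodup_append, hs]
          exact fun a ha h => hmem (h ▸ ha))]
        have hadd : PySem.Set.add s w = s ++ [w] := by
          simp [PySem.Set.add, PySem.Set.contains, hmem]
        simp [PySem.Set.update, hadd]

lemma items_foldl_insert_fun' {ν : Type} (f : String → ν) (l : List String) :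
    (l.foldl (fun (d : PySem.Dict String ν) w => d.insert w (f w)) PySem.Dict.empty).items
      = (PySem.Set.ofList l).map (fun w => (w, f w)) := by
  have := items_foldl_insert_fun f l [] (by simp)
  simpa [PySem.Set.update, PySem.Set.ofList, PySem.Dict.empty] using this

-- sum of the group counts of the masks satisfying P is the plain countP
lemma sum_counts_filter (masks : List Nat) (P : Nat → Bool) :
    ((((PySem.Set.ofList masks).filter P).map (fun k => ((masks.count k : Nat) : Int))).sum)
      = ((masks.countP P : Nat) : Int) := by
  have hperm : (PySem.Set.ofList masks).Perm masks.dedup := by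
    apply (List.perm_ext_iff_of_nodup (PySem.Set.nodup_ofList masks) masks.nodup_dedup).mpr
    intro a
    rw [PySem.Set.mem_ofList, List.mem_dedup]
  have := List.sum_map_count_dedup_filter_eq_countP P masks
  calc (((PySem.Set.ofList masks).filter P).map (fun k => ((masks.count k : Nat) : Int))).sum
      = ((masks.dedup.filter P).map (fun k => ((masks.count k : Nat) : Int))).sum :=
        ((hperm.filter P).map _).sum_eq
    _ = ((masks.countP P : Nat) : Int) := by
        rw [← this]
        rw [show (fun k => ((masks.count k : Nat) : Int))
            = (fun (n : Nat) => (n : Int)) ∘ (fun k => masks.count k) from rfl]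
        rw [← List.map_map, ← Nat.cast_list_sum]

-- getD at a valid index
lemma map_getD_range (l : List String) :
    (List.range l.length).map (fun i => l.getD i "") = l := by
  apply List.ext_getElem
  · simp
  · intro i h1 h2
    simp [List.getD_eq_getElem?_getD, List.getElem?_eq_getElem h2]

-- A's rank for index i < n equals rankOf of words[i]
lemma rankA_eq (words : List String) (i : Nat) (hi : i < words.length) :
    (List.range words.length).foldl
      (fun (r : Int) j =>
        if !(i == j) && share (words.getD i "") (words.getD j "") then r + 1 else r) 0
      = rankOf words (words.getD i "") := by
  set wi := words.getD i "" with hwi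
  rw [PySem.List.foldl_if_add_one, zero_add]
  have hc : (List.range words.length).countP
      (fun j => !(i == j) && share wi (words.getD j ""))
      = (List.range words.length).countP
      (fun j => !(j == i) && share wi (words.getD j "")) := by
    apply List.countP_congr
    intro j _
    cases h1 : i == j <;> cases h2 : j == i <;> simp_all
  rw [hc]
  rw [countP_range_ne words.length i hi (fun j => share wi (words.getD j ""))]
  have h2 : (List.range words.length).countP (fun j => share wi (words.getD j ""))
      = words.countP (fun v => share wi v) := by
    conv_rhs => rw [← map_getD_range words]
    rw [List.countP_map]; rfl
  rw [h2]
  have hS : words.countP (fun v => share wi v)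
      + (words.map charMask).countP (fun mm => mm &&& charMask wi == 0)
      = words.length := by
    have hlen := List.length_eq_countP_add_countP (p := fun v => share wi v) (l := words)
    have h4 : words.countP (fun a => decide ¬(share wi a = true))
        = (words.map charMask).countP (fun mm => mm &&& charMask wi == 0) := by
      rw [List.countP_map]
      apply List.countP_congr
      intro v _
      simp [share_eq, Nat.and_comm]
    omega
  have hself : (if share wi wi then (1:Int) else 0)
      = (if charMask wi ≠ 0 then 1 else 0) := by
    rw [share_self]
    by_cases h : charMask wi = 0 <;> simp [h]
  rw [← hwi]
  rw [hself]
  unfold rankOf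
  omega

-- the A program in canonical form
lemma interlink_eq_bestOf (words : List String) : interlink words = bestOf words := by
  unfold interlink
  simp only []
  have hne : ∀ i, i < words.length → List.range words.length ≠ [] := by
    intro i hi h
    rw [List.range_eq_nil] at h
    omega
  have houter : (List.range words.length).foldl
      (fun (d : PySem.Dict String Int) i =>
        let wi := words.getD i ""
        ((List.range words.length).foldl
          (fun (s : Int × PySem.Dict String Int) j =>
            let rank := if !(i == j) && share wi (words.getD j "") then s.1 + 1 else s.1
            (rank, s.2.insert wi rank))
          ((0 : Int), d)).2)
      PySem.Dict.empty
      = words.foldl (fun d w => d.insert w (rankOf words w)) PySem.Dict.empty := by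
    rw [PySem.List.foldl_congr_mem
      (g := fun d i => d.insert (words.getD i "") (rankOf words (words.getD i "")))]
    · set F := rankOf words with hF
      conv_rhs => rw [← map_getD_range words]
      rw [List.foldl_map]
    · intro d i hmem
      have hi' : i < words.length := List.mem_range.mp hmem
      have h := foldl_pair_insert (List.range words.length) (hne i hi')
        (fun (r : Int) j => if !(i == j) && share (words.getD i "") (words.getD j "") then r + 1 else r)
        (words.getD i "") 0 d
      exact (congrArg Prod.snd h).trans (by rw [rankA_eq words i hi'])
  rw [houter, items_foldl_insert_fun' (fun w => rankOf words w) words]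
  rw [List.foldl_map]
  rfl

-- B's per-word rank expression equals rankOf
lemma rankB_eq (words : List String) (w : String) :
    (words.length : Int)
      - ((((PySem.Dict.counter (words.map charMask)).items.filter
            (fun q => q.1 &&& charMask w == 0)).map (fun q => q.2)).sum)
      - (if charMask w ≠ 0 then 1 else 0)
    = rankOf words w := by
  rw [PySem.Dict.items_counter, List.filter_map, List.map_map]
  simp only [Function.comp_def]
  rw [sum_counts_filter (words.map charMask) (fun k => k &&& charMask w == 0)]
  rfl

-- the B program in canonical form
lemma interlink_alt_eq_bestOf (words : List String) : interlink_alt words = bestOf words := by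
  unfold interlink_alt
  simp only []
  rw [PySem.List.foldl_prod_mk
    (f := fun (d : PySem.Dict String Nat) w => d.insert w (charMask w))
    (g := fun (d : PySem.Dict Nat Int) w =>
      d.insert (charMask w) (d.getD (charMask w) 0 + 1))]
  have hmc : words.foldl
      (fun (d : PySem.Dict Nat Int) w => d.insert (charMask w) (d.getD (charMask w) 0 + 1))
      PySem.Dict.empty = PySem.Dict.counter (words.map charMask) := by
    rw [← PySem.Dict.foldl_insert_getD_add_one_eq_counter, List.foldl_map]
  rw [hmc, items_foldl_insert_fun' charMask words, List.foldl_map]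
  unfold bestOf
  apply congrArg
  apply PySem.List.foldl_congr_mem
  intro s w _
  simp only []
  rw [rankB_eq words w]

-- ===== VERDICT (by name: the statement is the Claim_ definition above) =====
theorem interlink_spec : Claim_equal_interlink := by
  intro words _
  show interlink words = interlink_alt words
  rw [interlink_eq_bestOf, interlink_alt_eq_bestOf]
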